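-- pv_equiv track=rewrite | github.com/Dong-yeong0/problem-solving | 프로그래머스/0/181864. 문자열 바꿔서 찾기/문자열 바꿔서 찾기.py | solution
-- ===== SOURCE A (Python) =====
-- def solution(myString, pat):
--     swapped_str = ''
--     for char in myString:
--         if char == 'A':
--             swapped_str += 'B'
--         elif char == 'B':
--             swapped_str += 'A'
--
--     if pat in swapped_str:
--         return 1
--     else:
--     	return 0
-- ===== SOURCE B (Python) =====
-- def solution(myString, pat):
--     filtered = ''.join(c for c in myString if c == 'A' or c == 'B')
--     swapped_pat = ''.join('B' if c == 'A' else 'A' if c == 'B' else c for c in pat)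
--     return 1 if swapped_pat in filtered else 0
-- ===== Notes on version B (the rewrite author's own statement) =====
-- stated objective: alternative
-- what changed: Instead of building the A/B-swapped haystack and searching for pat, B filters the haystack to its A/B characters unchanged and swaps the needle, exploiting that the A<->B swap is an involution.
import Mathlib
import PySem

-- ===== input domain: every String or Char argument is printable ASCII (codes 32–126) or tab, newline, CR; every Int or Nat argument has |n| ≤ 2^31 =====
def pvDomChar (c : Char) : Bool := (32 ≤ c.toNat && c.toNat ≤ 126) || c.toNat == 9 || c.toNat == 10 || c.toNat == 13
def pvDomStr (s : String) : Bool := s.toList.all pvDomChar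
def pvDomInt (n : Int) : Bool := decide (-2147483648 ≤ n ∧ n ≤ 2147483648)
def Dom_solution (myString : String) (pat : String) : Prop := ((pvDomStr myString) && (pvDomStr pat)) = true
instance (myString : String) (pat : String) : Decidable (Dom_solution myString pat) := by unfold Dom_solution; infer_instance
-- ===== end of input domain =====

-- B filters the haystack to its A/B characters and searches it for the A↔B-swapped needle
-- (the swap is an involution), instead of A's building of the swapped haystack; same cost.

-- ===== PORT A =====
-- the loop: append 'B' for 'A', 'A' for 'B', drop anything else
def solution (myString : String) (pat : String) : Int :=
  let swapped := myString.toList.foldl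
    (fun acc c => if c = 'A' then acc ++ ['B'] else if c = 'B' then acc ++ ['A'] else acc) []
  if PySem.Chars.isIn pat.toList swapped then 1 else 0

-- ===== PORT B =====
def swapAB (c : Char) : Char := if c = 'A' then 'B' else if c = 'B' then 'A' else c

def solution_alt (myString : String) (pat : String) : Int :=
  let filtered := myString.toList.filter (fun c => c = 'A' ∨ c = 'B')
  let swappedPat := pat.toList.map swapAB
  if PySem.Chars.isIn swappedPat filtered then 1 else 0

-- ===== PRECONDITION & SPEC =====
def Spec_solution (myString : String) (pat : String) (out : Int) : Prop := out = solution_alt myString pat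
instance (myString : String) (pat : String) (out : Int) : Decidable (Spec_solution myString pat out) := by unfold Spec_solution; infer_instance

-- ===== CLAIM (what is proved, stated in full; the proofs are below) =====
def Claim_equal_solution : Prop := ∀ (myString : String) (pat : String), Dom_solution myString pat → Spec_solution myString pat (solution myString pat)

-- ===== LEMMAS AND PROOFS =====

theorem swapAB_invol (c : Char) : swapAB (swapAB c) = c := by
  unfold swapAB; split_ifs with h1 h2 <;> simp_all

theorem map_swapAB_swapAB (l : List Char) : (l.map swapAB).map swapAB = l := by
  induction l with
  | nil => rfl
  | cons c t ih => simp [ih, swapAB_invol]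

-- A's loop builds exactly: swap the kept A/B characters of the filtered haystack
theorem foldlA_eq (l : List Char) (acc : List Char) :
    l.foldl (fun acc c => if c = 'A' then acc ++ ['B'] else if c = 'B' then acc ++ ['A'] else acc) acc
      = acc ++ (l.filter (fun c => c = 'A' ∨ c = 'B')).map swapAB := by
  induction l generalizing acc with
  | nil => simp
  | cons c t ih =>
    by_cases h1 : c = 'A'
    · simp [List.foldl_cons, ih, h1, swapAB]
    · by_cases h2 : c = 'B'
      · simp [List.foldl_cons, ih, h2, swapAB]
      · simp [List.foldl_cons, ih, h1, h2]

theorem infix_map_swap (sub s : List Char) :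
    sub <:+: s.map swapAB ↔ sub.map swapAB <:+: s := by
  constructor
  · intro h
    have h2 := h.map swapAB
    rw [map_swapAB_swapAB] at h2
    exact h2
  · intro h
    have h2 := h.map swapAB
    rw [map_swapAB_swapAB] at h2
    exact h2

-- ===== VERDICT (by name: the statement is the Claim_ definition above) =====
theorem solution_spec : Claim_equal_solution := by
  intro myString pat _
  unfold Spec_solution solution solution_alt
  simp only [foldlA_eq, List.nil_append]
  have hiff : PySem.Chars.isIn pat.toList
        ((myString.toList.filter (fun c => c = 'A' ∨ c = 'B')).map swapAB) = true ↔
      PySem.Chars.isIn (pat.toList.map swapAB)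
        (myString.toList.filter (fun c => c = 'A' ∨ c = 'B')) = true := by
    rw [PySem.Chars.isIn_iff_infix, PySem.Chars.isIn_iff_infix]
    exact infix_map_swap _ _
  have hbe : PySem.Chars.isIn pat.toList
        ((myString.toList.filter (fun c => c = 'A' ∨ c = 'B')).map swapAB)
      = PySem.Chars.isIn (pat.toList.map swapAB)
        (myString.toList.filter (fun c => c = 'A' ∨ c = 'B')) := by
    exact Bool.eq_iff_iff.mpr hiff
  rw [hbe]
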